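-- pv_equiv track=rewrite | github.com/Goutam-Baid-zzz/Complaint-Categorizer-ML | src/models/predict.py | detect_rules
-- ===== SOURCE A (Python) =====
-- def detect_rules(text):
--     """
--     Apply domain-specific rule-based overrides to handle edge cases and high-priority keywords.
--     Ensures that critical issues (fraud, scams) are flagged immediately, bypassing ML inaccuracies.
--     """
--     text = text.lower()
--     # 🔴 FRAUD (highest priority)
--     if any(word in text for word in ["fraud", "scam", "unauthorized", "identity theft"]):
--         return "Fraud / Scam", "High"
--     # 🟡 PAYMENT
--     if any(word in text for word in ["charged", "payment", "transaction", "deducted"]):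
--         return "Payment Issues", "Medium"
--     # 🟡 TECHNICAL
--     if any(word in text for word in ["crash", "error", "bug", "not working"]):
--         return "Technical Issues", "Medium"
--     # 🟢 CUSTOMER SERVICE
--     if any(word in text for word in ["not responding", "no response", "customer support"]):
--         return "Customer Service", "Low"
--     return None, None
-- ===== SOURCE B (Python) =====
-- # B: no per-rule cascade; a flat keyword -> rule-index table is scanned once,
-- # all matching indices are collected and the output of the minimum index wins.
-- KEYWORDS = [
--     ("fraud", 0), ("scam", 0), ("unauthorized", 0), ("identity theft", 0),
--     ("charged", 1), ("payment", 1), ("transaction", 1), ("deducted", 1),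
--     ("crash", 2), ("error", 2), ("bug", 2), ("not working", 2),
--     ("not responding", 3), ("no response", 3), ("customer support", 3),
-- ]
-- OUTPUTS = [
--     ("Fraud / Scam", "High"),
--     ("Payment Issues", "Medium"),
--     ("Technical Issues", "Medium"),
--     ("Customer Service", "Low"),
-- ]
--
-- def detect_rules(text):
--     t = text.lower()
--     hits = [i for w, i in KEYWORDS if w in t]
--     return OUTPUTS[min(hits)] if hits else (None, None)
-- ===== Notes on version B (the rewrite author's own statement) =====
-- stated objective: alternative
-- what changed: Replaced the ordered first-match cascade of per-rule any() checks with a flat keyword-to-rule-index table: B tests every keyword (no short-circuit), collects the indices of all matches, and returns the output row of the minimum index.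
import Mathlib
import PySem

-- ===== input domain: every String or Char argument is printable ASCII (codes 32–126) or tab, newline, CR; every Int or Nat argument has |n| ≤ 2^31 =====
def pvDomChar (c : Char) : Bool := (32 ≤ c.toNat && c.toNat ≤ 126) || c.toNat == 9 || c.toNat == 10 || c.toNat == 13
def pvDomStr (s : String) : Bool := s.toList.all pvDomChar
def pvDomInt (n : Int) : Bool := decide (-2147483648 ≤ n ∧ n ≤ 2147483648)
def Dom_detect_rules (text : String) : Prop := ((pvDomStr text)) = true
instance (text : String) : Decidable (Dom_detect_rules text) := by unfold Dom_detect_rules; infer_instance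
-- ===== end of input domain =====

-- B replaces A's first-match rule cascade by a flat keyword→rule-index table:
-- all matches are collected and the minimum index wins (objective: alternative).


-- ===== PORT A =====
def detect_rules (text : String) : Option String × Option String :=
  let t := PySem.Str.lower text
  if ["fraud", "scam", "unauthorized", "identity theft"].any (fun w => PySem.Str.isIn w t) then
    (some "Fraud / Scam", some "High")
  else if ["charged", "payment", "transaction", "deducted"].any (fun w => PySem.Str.isIn w t) then
    (some "Payment Issues", some "Medium")
  else if ["crash", "error", "bug", "not working"].any (fun w => PySem.Str.isIn w t) then
    (some "Technical Issues", some "Medium")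
  else if ["not responding", "no response", "customer support"].any (fun w => PySem.Str.isIn w t) then
    (some "Customer Service", some "Low")
  else (none, none)

-- ===== PORT B =====
-- flat keyword → rule-index table (Source B's KEYWORDS) and the output rows (OUTPUTS)
def pvKeywords : List (String × Nat) :=
  [("fraud", 0), ("scam", 0), ("unauthorized", 0), ("identity theft", 0),
   ("charged", 1), ("payment", 1), ("transaction", 1), ("deducted", 1),
   ("crash", 2), ("error", 2), ("bug", 2), ("not working", 2),
   ("not responding", 3), ("no response", 3), ("customer support", 3)]

def pvOutputs : List (Option String × Option String) :=
  [(some "Fraud / Scam", some "High"),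
   (some "Payment Issues", some "Medium"),
   (some "Technical Issues", some "Medium"),
   (some "Customer Service", some "Low")]

def detect_rules_alt (text : String) : Option String × Option String :=
  let t := PySem.Str.lower text
  let hits := (pvKeywords.filter (fun p => PySem.Str.isIn p.1 t)).map Prod.snd
  match PySem.List.min? hits (fun x => x) with
  | some i => pvOutputs.getD i (none, none)
  | none => (none, none)

-- ===== PRECONDITION & SPEC =====
def Spec_detect_rules (text : String) (out : Option String × Option String) : Prop := out = detect_rules_alt text
instance (text : String) (out : Option String × Option String) : Decidable (Spec_detect_rules text out) := by unfold Spec_detect_rules; infer_instance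

-- ===== CLAIM (what is proved, stated in full; the proofs are below) =====
def Claim_equal_detect_rules : Prop := ∀ (text : String), Dom_detect_rules text → Spec_detect_rules text (detect_rules text)

-- ===== LEMMAS AND PROOFS =====

-- membership in B's hit list, rule by rule
theorem pv_hits_mem (f : String → Bool) (x : Nat) :
    x ∈ (pvKeywords.filter (fun p => f p.1)).map Prod.snd ↔
      (x = 0 ∧ (f "fraud" || f "scam" || f "unauthorized" || f "identity theft")) ∨
      (x = 1 ∧ (f "charged" || f "payment" || f "transaction" || f "deducted")) ∨
      (x = 2 ∧ (f "crash" || f "error" || f "bug" || f "not working")) ∨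
      (x = 3 ∧ (f "not responding" || f "no response" || f "customer support")) := by
  simp only [pvKeywords, List.mem_map, List.mem_filter, List.mem_cons, List.not_mem_nil,
    or_false, Bool.or_eq_true]
  constructor
  · rintro ⟨p, ⟨hmem, hq⟩, rfl⟩
    rcases hmem with rfl|rfl|rfl|rfl|rfl|rfl|rfl|rfl|rfl|rfl|rfl|rfl|rfl|rfl|rfl <;> simp_all
  · rintro (⟨rfl, hc⟩|⟨rfl, hc⟩|⟨rfl, hc⟩|⟨rfl, hc⟩) <;>
      [rcases hc with ((h|h)|h)|h; rcases hc with ((h|h)|h)|h;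
       rcases hc with ((h|h)|h)|h; rcases hc with (h|h)|h] <;>
      first
      | exact ⟨("fraud", 0), ⟨by simp, h⟩, rfl⟩
      | exact ⟨("scam", 0), ⟨by simp, h⟩, rfl⟩
      | exact ⟨("unauthorized", 0), ⟨by simp, h⟩, rfl⟩
      | exact ⟨("identity theft", 0), ⟨by simp, h⟩, rfl⟩
      | exact ⟨("charged", 1), ⟨by simp, h⟩, rfl⟩
      | exact ⟨("payment", 1), ⟨by simp, h⟩, rfl⟩
      | exact ⟨("transaction", 1), ⟨by simp, h⟩, rfl⟩
      | exact ⟨("deducted", 1), ⟨by simp, h⟩, rfl⟩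
      | exact ⟨("crash", 2), ⟨by simp, h⟩, rfl⟩
      | exact ⟨("error", 2), ⟨by simp, h⟩, rfl⟩
      | exact ⟨("bug", 2), ⟨by simp, h⟩, rfl⟩
      | exact ⟨("not working", 2), ⟨by simp, h⟩, rfl⟩
      | exact ⟨("not responding", 3), ⟨by simp, h⟩, rfl⟩
      | exact ⟨("no response", 3), ⟨by simp, h⟩, rfl⟩
      | exact ⟨("customer support", 3), ⟨by simp, h⟩, rfl⟩

-- the min of the hit indices is the first rule whose keyword group matched
theorem pv_key (f : String → Bool) :
    (match PySem.List.min? ((pvKeywords.filter (fun p => f p.1)).map Prod.snd) (fun x => x) with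
     | some i => pvOutputs.getD i (none, none)
     | none => ((none : Option String), (none : Option String)))
    = if f "fraud" || f "scam" || f "unauthorized" || f "identity theft" then (some "Fraud / Scam", some "High")
      else if f "charged" || f "payment" || f "transaction" || f "deducted" then (some "Payment Issues", some "Medium")
      else if f "crash" || f "error" || f "bug" || f "not working" then (some "Technical Issues", some "Medium")
      else if f "not responding" || f "no response" || f "customer support" then (some "Customer Service", some "Low")
      else (none, none) := by
  set L := (pvKeywords.filter (fun p => f p.1)).map Prod.snd with hL
  split_ifs with h0 h1 h2 h3
  · have hi : (0 : Nat) ∈ L := (pv_hits_mem f 0).2 (Or.inl ⟨rfl, h0⟩)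
    cases hm : PySem.List.min? L (fun x => x) with
    | none => exact absurd ((PySem.List.min?_eq_none_iff _ _).1 hm ▸ hi) (List.not_mem_nil)
    | some m =>
      have hle := PySem.List.min?_isMin hm 0 hi
      have hm0 : m = 0 := Nat.le_antisymm hle (Nat.zero_le m)
      simp [hm0, pvOutputs]
  · have hi : (1 : Nat) ∈ L := (pv_hits_mem f 1).2 (Or.inr (Or.inl ⟨rfl, h1⟩))
    cases hm : PySem.List.min? L (fun x => x) with
    | none => exact absurd ((PySem.List.min?_eq_none_iff _ _).1 hm ▸ hi) (List.not_mem_nil)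
    | some m =>
      have hle := PySem.List.min?_isMin hm 1 hi
      have hmem := (pv_hits_mem f m).1 (PySem.List.min?_mem hm)
      have hm1 : m = 1 := by
        rcases hmem with ⟨h, hc⟩ | ⟨h, _⟩ | ⟨h, _⟩ | ⟨h, _⟩
        · exact absurd hc h0
        · exact h
        · omega
        · omega
      simp [hm1, pvOutputs]
  · have hi : (2 : Nat) ∈ L := (pv_hits_mem f 2).2 (Or.inr (Or.inr (Or.inl ⟨rfl, h2⟩)))
    cases hm : PySem.List.min? L (fun x => x) with
    | none => exact absurd ((PySem.List.min?_eq_none_iff _ _).1 hm ▸ hi) (List.not_mem_nil)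
    | some m =>
      have hle := PySem.List.min?_isMin hm 2 hi
      have hmem := (pv_hits_mem f m).1 (PySem.List.min?_mem hm)
      have hm2 : m = 2 := by
        rcases hmem with ⟨h, hc⟩ | ⟨h, hc⟩ | ⟨h, _⟩ | ⟨h, _⟩
        · exact absurd hc h0
        · exact absurd hc h1
        · exact h
        · omega
      simp [hm2, pvOutputs]
  · have hi : (3 : Nat) ∈ L := (pv_hits_mem f 3).2 (Or.inr (Or.inr (Or.inr ⟨rfl, h3⟩)))
    cases hm : PySem.List.min? L (fun x => x) with
    | none => exact absurd ((PySem.List.min?_eq_none_iff _ _).1 hm ▸ hi) (List.not_mem_nil)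
    | some m =>
      have hmem := (pv_hits_mem f m).1 (PySem.List.min?_mem hm)
      have hm3 : m = 3 := by
        rcases hmem with ⟨h, hc⟩ | ⟨h, hc⟩ | ⟨h, hc⟩ | ⟨h, _⟩
        · exact absurd hc h0
        · exact absurd hc h1
        · exact absurd hc h2
        · exact h
      simp [hm3, pvOutputs]
  · have hnil : L = [] := by
      rw [List.eq_nil_iff_forall_not_mem]
      intro x hx
      rcases (pv_hits_mem f x).1 hx with ⟨_, hc⟩ | ⟨_, hc⟩ | ⟨_, hc⟩ | ⟨_, hc⟩
      · exact h0 hc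
      · exact h1 hc
      · exact h2 hc
      · exact h3 hc
    rw [hnil]
    rfl

-- ===== VERDICT (by name: the statement is the Claim_ definition above) =====
set_option maxHeartbeats 1000000 in
theorem detect_rules_spec : Claim_equal_detect_rules := by
  intro text _
  unfold Spec_detect_rules detect_rules detect_rules_alt
  simp only [List.any_cons, List.any_nil, Bool.or_false]
  have h := pv_key (fun w => PySem.Str.isIn w (PySem.Str.lower text))
  simp only [Bool.or_assoc] at h
  exact h.symm
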